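-- pv_equiv track=rewrite | github.com/dsweet99/dryer | test/benchmark_data/module_029.py | compute_29_7
-- ===== SOURCE A (Python) =====
-- def compute_29_7(a, b, c):
--     x = a * 515 + b * 428
--     y = c * 357 - a * 284
--     for i in range(21):
--         x = x + i * 95
--         y = y - i * 44
--         if x > 7970:
--             x = x % 2485
--     return x + y + 204
-- ===== SOURCE B (Python) =====
-- def compute_29_7(a, b, c):
--     # Event-driven: instead of updating x on every iteration, jump straight to
--     # each modulo event using triangular-number prefix sums; y's accumulation
--     # is the closed form c*357 - a*284 - 9240.
--     def tri(j):  # 95 * (0 + 1 + ... + (j - 1))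
--         return 95 * (j * (j - 1) // 2)
--     x = a * 515 + b * 428
--     i = 0
--     while i < 21:
--         j = i
--         while j < 21 and x + tri(j + 1) - tri(i) <= 7970:
--             j += 1
--         if j == 21:
--             x += tri(21) - tri(i)
--             break
--         x = (x + tri(j + 1) - tri(i)) % 2485
--         i = j + 1
--     return x + (c * 357 - a * 284 - 9240) + 204
-- ===== Notes on version B (the rewrite author's own statement) =====
-- stated objective: alternative
-- what changed: B is event-driven: instead of updating x on all 21 iterations it jumps directly to each modulo event using triangular-number prefix sums (x changes only once per event), and y's accumulation becomes the closed form c*357 - a*284 - 9240.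
import Mathlib
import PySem

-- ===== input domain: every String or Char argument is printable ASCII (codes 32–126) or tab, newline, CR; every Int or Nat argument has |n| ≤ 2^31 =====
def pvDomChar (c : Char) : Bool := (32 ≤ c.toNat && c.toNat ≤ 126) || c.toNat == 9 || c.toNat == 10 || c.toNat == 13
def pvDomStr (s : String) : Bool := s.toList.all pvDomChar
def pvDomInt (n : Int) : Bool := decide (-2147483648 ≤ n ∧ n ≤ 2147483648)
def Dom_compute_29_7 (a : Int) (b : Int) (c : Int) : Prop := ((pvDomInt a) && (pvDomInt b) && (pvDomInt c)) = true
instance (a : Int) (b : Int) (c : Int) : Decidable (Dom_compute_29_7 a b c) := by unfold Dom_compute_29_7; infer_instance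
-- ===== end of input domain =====

-- B is event-driven: it jumps straight to each modulo event of x via triangular-number prefix sums instead of updating x every iteration, and computes y in closed form (objective: alternative).


-- ===== PORT A =====
-- loop body of A: updates the pair (x, y) for one i
def stepA (p : Int × Int) (i : Int) : Int × Int :=
  let x := p.1 + i * 95
  let y := p.2 - i * 44
  (if x > 7970 then PySem.Int.mod x 2485 else x, y)

def compute_29_7 (a : Int) (b : Int) (c : Int) : Int :=
  let x := a * 515 + b * 428
  let y := c * 357 - a * 284
  let p := (PySem.List.pyRange 0 21 1).foldl stepA (x, y)
  p.1 + p.2 + 204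

-- ===== PORT B =====
-- tri(j) = 95 * (0 + 1 + ... + (j-1)), the total increment of x over iterations 0..j-1
def triB (j : Int) : Int := 95 * PySem.Int.floordiv (j * (j - 1)) 2

-- inner while loop of Source B: first j ≥ the given j with j = 21 or x + tri(j+1) - tri(i) > 7970
-- (fuel makes the while loop structural; 21 steps always suffice since j starts at i ≥ 0)
def findJ (x i : Int) (j : Int) : Nat → Int
  | 0 => j
  | f + 1 =>
      if j < 21 ∧ x + triB (j + 1) - triB i ≤ 7970 then findJ x i (j + 1) f else j

-- outer while loop of Source B: one recursion step per modulo event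
def runB (x i : Int) : Nat → Int
  | 0 => x
  | f + 1 =>
      if i < 21 then
        let j := findJ x i i 21
        if j = 21 then x + triB 21 - triB i
        else runB (PySem.Int.mod (x + triB (j + 1) - triB i) 2485) (j + 1) f
      else x

def compute_29_7_alt (a : Int) (b : Int) (c : Int) : Int :=
  let x := runB (a * 515 + b * 428) 0 22
  x + (c * 357 - a * 284 - 9240) + 204

-- ===== PRECONDITION & SPEC =====
def Spec_compute_29_7 (a : Int) (b : Int) (c : Int) (out : Int) : Prop := out = compute_29_7_alt a b c
instance (a : Int) (b : Int) (c : Int) (out : Int) : Decidable (Spec_compute_29_7 a b c out) := by unfold Spec_compute_29_7; infer_instance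

-- ===== CLAIM (what is proved, stated in full; the proofs are below) =====
def Claim_equal_compute_29_7 : Prop := ∀ (a : Int) (b : Int) (c : Int), Dom_compute_29_7 a b c → Spec_compute_29_7 a b c (compute_29_7 a b c)

-- ===== LEMMAS AND PROOFS =====
-- x-component of A's loop body, used to characterise A's fold
def stepB (x : Int) (i : Int) : Int :=
  let x' := x + i * 95
  if x' > 7970 then PySem.Int.mod x' 2485 else x'

theorem triB_succ (j : Int) : triB (j + 1) = triB j + j * 95 := by
  unfold triB
  rw [PySem.Int.floordiv_eq_ediv_of_pos (by norm_num), PySem.Int.floordiv_eq_ediv_of_pos (by norm_num)]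
  have h : (j + 1) * (j + 1 - 1) = j * (j - 1) + j * 2 := by ring
  rw [h, Int.add_mul_ediv_right _ _ (by norm_num)]
  ring

-- A's paired fold splits: the x-component folds stepB, y just subtracts 44·i
theorem foldA_split (l : List Int) (x y : Int) :
    l.foldl stepA (x, y) = (l.foldl stepB x, y - (l.map (fun i => i * 44)).sum) := by
  induction l generalizing x y with
  | nil => simp
  | cons i l ih =>
    simp only [List.foldl_cons, List.map_cons, List.sum_cons, stepA, stepB]
    rw [ih]
    ring_nf

-- specification of the inner search
theorem findJ_spec (x i : Int) : ∀ (f : Nat) (j : Int), j ≤ 21 → (21 - j).toNat ≤ f →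
    j ≤ findJ x i j f ∧ findJ x i j f ≤ 21 ∧
    (∀ k, j ≤ k → k < findJ x i j f → x + triB (k + 1) - triB i ≤ 7970) ∧
    (findJ x i j f = 21 ∨ x + triB (findJ x i j f + 1) - triB i > 7970) := by
  intro f
  induction f with
  | zero =>
    intro j hj hf
    have : j = 21 := by omega
    subst this
    simp only [findJ]
    refine ⟨le_refl _, le_refl _, by omega, Or.inl ?_⟩
    trivial
  | succ f ih =>
    intro j hj hf
    by_cases h : j < 21 ∧ x + triB (j + 1) - triB i ≤ 7970
    · have hrec := ih (j + 1) (by omega) (by omega)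
      simp only [findJ, if_pos h]
      refine ⟨by omega, hrec.2.1, ?_, hrec.2.2.2⟩
      intro k hk1 hk2
      rcases eq_or_lt_of_le hk1 with heq | hlt
      · subst heq; exact h.2
      · exact hrec.2.2.1 k (by omega) hk2
    · simp only [findJ, if_neg h]
      refine ⟨le_refl _, hj, by omega, ?_⟩
      push Not at h
      rcases lt_or_ge j 21 with h21 | h21
      · exact Or.inr (by have := h h21; omega)
      · exact Or.inl (by omega)

-- a mod-free segment of A's x-loop is a pure prefix-sum jump
theorem seg (n : Nat) : ∀ (i x : Int),
    (∀ k, i ≤ k → k < i + (n : Int) → x + triB (k + 1) - triB i ≤ 7970) →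
    (PySem.List.pyRange i (i + (n : Int)) 1).foldl stepB x = x + triB (i + (n : Int)) - triB i := by
  induction n with
  | zero =>
    intro i x _
    rw [PySem.List.pyRange_one_eq_nil (by omega)]
    simp
  | succ n ih =>
    intro i x h
    rw [PySem.List.pyRange_one_cons (by omega)]
    simp only [List.foldl_cons]
    have hstep : stepB x i = x + i * 95 := by
      have := h i (le_refl _) (by omega)
      rw [triB_succ] at this
      simp only [stepB]
      rw [if_neg (by omega)]
    rw [hstep]
    have hcast : i + ((n : Int) + 1) = (i + 1) + (n : Int) := by ring
    have hx := ih (i + 1) (x + i * 95) (by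
      intro k hk1 hk2
      have := h k (by omega) (by push_cast; omega)
      rw [triB_succ i] at *
      omega)
    push_cast
    rw [hcast, hx]
    rw [triB_succ i]
    have : i + 1 + (n : Int) = i + ((n : Int) + 1) := by ring
    rw [this]
    ring

-- the outer event loop of B computes A's x-fold
theorem run_eq : ∀ (f : Nat) (i x : Int), 0 ≤ i → i ≤ 21 → (21 - i).toNat ≤ f →
    runB x i f = (PySem.List.pyRange i 21 1).foldl stepB x := by
  intro f
  induction f with
  | zero =>
    intro i x h0 h21 hf
    have : i = 21 := by omega
    subst this
    rw [PySem.List.pyRange_one_eq_nil (by omega)]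
    simp [runB]
  | succ f ih =>
    intro i x h0 h21 hf
    by_cases hi : i < 21
    · have hspec := findJ_spec x i 21 i h21 (by omega)
      set r := findJ x i i 21 with hr
      simp only [runB, if_pos hi, ← hr]
      by_cases h21r : r = 21
      · rw [if_pos h21r]
        have hseg := seg (21 - i).toNat i x (by
          intro k hk1 hk2
          exact hspec.2.2.1 k hk1 (by omega))
        have : i + ((21 - i).toNat : Int) = 21 := by omega
        rw [this] at hseg
        omega
      · rw [if_neg h21r]
        have hrlt : r < 21 := by omega
        have hexc : x + triB (r + 1) - triB i > 7970 := by
          rcases hspec.2.2.2 with h | h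
          · exact absurd h h21r
          · exact h
        -- split the range at r
        rw [PySem.List.pyRange_one_append i r 21 hspec.1 (by omega),
            PySem.List.pyRange_one_cons hrlt, List.foldl_append, List.foldl_cons]
        have hseg := seg (r - i).toNat i x (by
          intro k hk1 hk2
          exact hspec.2.2.1 k hk1 (by omega))
        have hri : i + ((r - i).toNat : Int) = r := by omega
        rw [hri] at hseg
        rw [hseg]
        have hstep : stepB (x + triB r - triB i) r
            = PySem.Int.mod (x + triB (r + 1) - triB i) 2485 := by
          simp only [stepB]
          rw [triB_succ] at hexc ⊢
          rw [if_pos (by omega)]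
          ring_nf
        rw [hstep]
        exact ih (r + 1) _ (by omega) (by omega) (by omega)
    · have : i = 21 := by omega
      subst this
      rw [PySem.List.pyRange_one_eq_nil (by omega)]
      simp [runB]

-- ===== VERDICT (by name: the statement is the Claim_ definition above) =====
theorem compute_29_7_spec : Claim_equal_compute_29_7 := by
  intro a b c _
  show compute_29_7 a b c = compute_29_7_alt a b c
  simp only [compute_29_7, compute_29_7_alt, foldA_split]
  rw [run_eq 22 0 (a * 515 + b * 428) (by norm_num) (by norm_num) (by norm_num)]
  have : ((PySem.List.pyRange 0 21 1).map (fun i => i * 44)).sum = 9240 := by decide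
  rw [this]
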